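-- pv_equiv track=rewrite | github.com/ASSERT-KTH/Mokav | experiments/pynguin/c4b/return-lst/generated_tests/src_1875/2/src_1875.py | func
-- ===== SOURCE A (Python) =====
-- def func(*args):
-- 	ret_values = []
--
-- 	s = args[0]
-- 	l = s[0]
-- 	n = 1
-- 	for i in s[1:]:
-- 	    if (i > l):
-- 	        l = i
-- 	        n = 1
-- 	    elif (i == l):
-- 	        n += 1
-- 	ret_values.append((l * n))
--
-- 	return ret_values
-- ===== SOURCE B (Python) =====
-- def func(*args):
--     s = args[0]
--     m = max(s)
--     return [m * s.count(m)]
-- ===== Notes on version B (the rewrite author's own statement) =====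
-- stated objective: idiomatic
-- what changed: Replaces the single hand-written pass tracking the running max and its running count with two stdlib scans: m = max(s) then s.count(m).
import Mathlib
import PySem

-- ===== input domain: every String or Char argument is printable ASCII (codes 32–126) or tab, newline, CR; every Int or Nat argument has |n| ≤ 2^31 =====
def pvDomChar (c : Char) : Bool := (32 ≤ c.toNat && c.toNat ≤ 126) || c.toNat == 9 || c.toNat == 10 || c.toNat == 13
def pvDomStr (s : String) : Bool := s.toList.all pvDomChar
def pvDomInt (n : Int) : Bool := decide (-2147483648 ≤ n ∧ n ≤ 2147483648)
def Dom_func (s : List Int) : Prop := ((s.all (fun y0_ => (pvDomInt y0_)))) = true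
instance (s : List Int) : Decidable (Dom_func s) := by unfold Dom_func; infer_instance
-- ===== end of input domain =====

-- B replaces A's single hand-written pass (running max + running count) by the idiomatic
-- two-scan decomposition: m = max(s), then s.count(m). Return value only; no mutation.

-- ===== PORT A =====
-- the loop body: if i > l: l, n = i, 1; elif i == l: n += 1
def funcStep (p : Int × Int) (i : Int) : Int × Int :=
  if i > p.1 then (i, 1) else if i = p.1 then (p.1, p.2 + 1) else p

def func (s : List Int) : List Int :=
  match PySem.List.pyGet? s 0 with
  | none => []  -- s[0] raises IndexError: excluded by Pre_func
  | some l0 =>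
    let p := (PySem.List.slice s (some 1) none).foldl funcStep (l0, 1)
    [p.1 * p.2]

-- ===== PORT B =====
def func_alt (s : List Int) : List Int :=
  match PySem.List.max? s (fun x => x) with
  | none => []  -- max([]) raises ValueError: excluded by Pre_func
  | some m => [m * (PySem.List.count s m : Int)]

-- ===== PRECONDITION & SPEC =====
-- A raises IndexError (and B ValueError) on the empty list; both return on every other list.
def Pre_func (s : List Int) : Prop := s ≠ []
instance (s : List Int) : Decidable (Pre_func s) := by unfold Pre_func; infer_instance

def pvWitness_func : List Int := [3, 1, 3, 2, 3]

def Spec_func (s : List Int) (out : List Int) : Prop := out = func_alt s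
instance (s : List Int) (out : List Int) : Decidable (Spec_func s out) := by unfold Spec_func; infer_instance

-- ===== CLAIM (what is proved, stated in full; the proofs are below) =====
def Claim_equal_func : Prop := ∀ (s : List Int), Dom_func s → Pre_func s → Spec_func s (func s)

-- ===== LEMMAS AND PROOFS =====

-- loop invariant: folding A's step over t from (l, n) yields the running max M = t.foldl max l
-- and, as count, n carried over iff the max never moved, plus M's occurrences in t.
lemma funcStep_foldl (t : List Int) : ∀ (l n : Int),
    t.foldl funcStep (l, n) =
      (t.foldl max l,
       (if t.foldl max l = l then n else 0) + (t.count (t.foldl max l) : Int)) := by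
  induction t with
  | nil => intro l n; simp
  | cons i rest ih =>
    intro l n
    simp only [List.foldl_cons, List.count_cons]
    rcases lt_trichotomy l i with h | h | h
    · rw [show funcStep (l, n) i = (i, 1) by simp [funcStep, h]]
      simp only [show max l i = i by omega]
      rw [ih i 1]
      have hle : i ≤ rest.foldl max i := (PySem.List.le_foldl_max rest i).1
      have hne : rest.foldl max i ≠ l := by omega
      by_cases hc : i = rest.foldl max i
      · simp [← hc]; omega
      · have hc' : rest.foldl max i ≠ i := fun h => hc h.symm
        have : ¬ (i == rest.foldl max i) = true := by simpa using hc
        simp [hc', hne, this]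
    · subst h
      rw [show funcStep (l, n) l = (l, n + 1) by simp [funcStep]]
      simp only [max_self]
      rw [ih l (n + 1)]
      by_cases hc : rest.foldl max l = l
      · simp [hc]; omega
      · have : ¬ (l == rest.foldl max l) = true := by simp; exact fun h : l = rest.foldl max l => hc h.symm
        simp [hc, this]
    · rw [show funcStep (l, n) i = (l, n) by
        simp only [funcStep]; rw [if_neg (by omega), if_neg (by omega)]]
      simp only [show max l i = l by omega]
      rw [ih l n]
      have hle : l ≤ rest.foldl max l := (PySem.List.le_foldl_max rest l).1
      have : ¬ (i == rest.foldl max l) = true := by simp; omega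
      simp [this]

-- ===== VERDICT (by name: the statement is the Claim_ definition above) =====
theorem func_spec : Claim_equal_func := by
  intro s _ hpre
  unfold Spec_func
  match s, hpre with
  | x :: t, _ =>
    unfold func func_alt
    rw [PySem.List.pyGet?_zero_cons, PySem.List.slice_from_one, PySem.List.max?_id_cons]
    simp only [List.tail_cons, funcStep_foldl, PySem.List.count_eq, List.count_cons]
    have hle : x ≤ t.foldl max x := (PySem.List.le_foldl_max t x).1
    by_cases hc : t.foldl max x = x
    · simp only [hc, beq_self_eq_true, if_pos, List.cons.injEq, and_true]
      push_cast; ring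
    · have : ¬ (x == t.foldl max x) = true := by simp; exact fun h : x = t.foldl max x => hc h.symm
      simp [hc, this]
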